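-- pv_equiv track=rewrite | github.com/gtaghon/cclm | cclm.py | _calculate_pop_count
-- ===== SOURCE A (Python) =====
-- def _calculate_pop_count(hash_values):
--     def popcount(x):
--         x = (x & 0x5555555555555555) + ((x >> 1) & 0x5555555555555555)
--         x = (x & 0x3333333333333333) + ((x >> 2) & 0x3333333333333333)
--         x = (x & 0x0F0F0F0F0F0F0F0F) + ((x >> 4) & 0x0F0F0F0F0F0F0F0F)
--         x = (x & 0x00FF00FF00FF00FF) + ((x >> 8) & 0x00FF00FF00FF00FF)
--         x = (x & 0x0000FFFF0000FFFF) + ((x >> 16) & 0x0000FFFF0000FFFF)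
--         x = (x & 0x00000000FFFFFFFF) + ((x >> 32) & 0x00000000FFFFFFFF)
--         return x
--
--     hash_mask = 0
--     for hash_value in hash_values:
--         hash_mask |= hash_value
--
--     return popcount(hash_mask)
-- ===== SOURCE B (Python) =====
-- def _calculate_pop_count(hash_values):
--     return sum(1 for bit in range(64)
--                if any((h >> bit) & 1 for h in hash_values))
-- ===== Notes on version B (the rewrite author's own statement) =====
-- stated objective: alternative
-- what changed: Instead of OR-reducing all values into one mask and then popcounting it with SWAR steps, B never builds a mask: it iterates over the 64 relevant bit positions and counts a position when any value in the list has that bit set (bit i of the OR is set iff some element has bit i set, and A's SWAR popcount reads exactly the low 64 two's-complement bits).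
import Mathlib
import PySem

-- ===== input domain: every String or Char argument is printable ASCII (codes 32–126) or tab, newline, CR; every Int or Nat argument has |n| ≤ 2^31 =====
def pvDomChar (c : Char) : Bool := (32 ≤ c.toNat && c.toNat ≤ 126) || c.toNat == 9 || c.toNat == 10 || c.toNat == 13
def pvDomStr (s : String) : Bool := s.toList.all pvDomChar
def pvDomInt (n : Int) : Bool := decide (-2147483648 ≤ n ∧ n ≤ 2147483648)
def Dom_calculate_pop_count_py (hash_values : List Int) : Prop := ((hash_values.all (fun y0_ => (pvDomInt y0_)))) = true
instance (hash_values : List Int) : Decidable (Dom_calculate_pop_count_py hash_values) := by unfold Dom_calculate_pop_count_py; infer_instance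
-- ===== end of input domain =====

-- B counts set bit positions directly (for each of the 64 positions, test whether any value
-- has that bit) instead of OR-reducing into a mask and SWAR-popcounting it (alternative
-- algorithm; return values proved equal on Dom).

-- ===== PORT A =====
-- A's nested helper `popcount` (the six SWAR steps), step for step.
def pvPopcountA (x0 : Int) : Int :=
  let x1 := PySem.Int.band x0 0x5555555555555555 + PySem.Int.band (x0 >>> (1 : Nat)) 0x5555555555555555
  let x2 := PySem.Int.band x1 0x3333333333333333 + PySem.Int.band (x1 >>> (2 : Nat)) 0x3333333333333333
  let x3 := PySem.Int.band x2 0x0F0F0F0F0F0F0F0F + PySem.Int.band (x2 >>> (4 : Nat)) 0x0F0F0F0F0F0F0F0F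
  let x4 := PySem.Int.band x3 0x00FF00FF00FF00FF + PySem.Int.band (x3 >>> (8 : Nat)) 0x00FF00FF00FF00FF
  let x5 := PySem.Int.band x4 0x0000FFFF0000FFFF + PySem.Int.band (x4 >>> (16 : Nat)) 0x0000FFFF0000FFFF
  PySem.Int.band x5 0x00000000FFFFFFFF + PySem.Int.band (x5 >>> (32 : Nat)) 0x00000000FFFFFFFF

def calculate_pop_count_py (hash_values : List Int) : Int :=
  let hash_mask := hash_values.foldl (fun hash_mask hash_value => PySem.Int.bor hash_mask hash_value) 0
  pvPopcountA hash_mask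

-- ===== PORT B =====
-- sum(1 for bit in range(64) if any((h >> bit) & 1 for h in hash_values));
-- `bit.toNat` is exact: range(64) yields only nonnegative shift amounts.
def calculate_pop_count_py_alt (hash_values : List Int) : Int :=
  (PySem.List.pyRange 0 64 1).foldl
    (fun acc bit =>
      if hash_values.any (fun h => PySem.Int.band (h >>> bit.toNat) 1 == 1) then acc + 1 else acc)
    0

-- ===== PRECONDITION & SPEC =====
def Spec_calculate_pop_count_py (hash_values : List Int) (out : Int) : Prop := out = calculate_pop_count_py_alt hash_values
instance (hash_values : List Int) (out : Int) : Decidable (Spec_calculate_pop_count_py hash_values out) := by unfold Spec_calculate_pop_count_py; infer_instance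

-- ===== CLAIM (what is proved, stated in full; the proofs are below) =====
def Claim_equal_calculate_pop_count_py : Prop := ∀ (hash_values : List Int), Dom_calculate_pop_count_py hash_values → Spec_calculate_pop_count_py hash_values (calculate_pop_count_py hash_values)

-- ===== LEMMAS AND PROOFS =====

-- Nat mirror of one SWAR step and of the six-step pipeline at widths 8/16/32/64.
def pvSt (s m x : Nat) : Nat := (x &&& m) + ((x >>> s) &&& m)
def pvW8 (x : Nat) : Nat := pvSt 4 0xF (pvSt 2 0x33 (pvSt 1 0x55 x))
def pvW16 (x : Nat) : Nat := pvSt 8 0xFF (pvSt 4 0x0F0F (pvSt 2 0x3333 (pvSt 1 0x5555 x)))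
def pvW32 (x : Nat) : Nat :=
  pvSt 16 0xFFFF (pvSt 8 0x00FF00FF (pvSt 4 0x0F0F0F0F (pvSt 2 0x33333333 (pvSt 1 0x55555555 x))))
def pvStRest (x : Nat) : Nat :=
  pvSt 32 0xFFFFFFFF (pvSt 16 0x0000FFFF0000FFFF (pvSt 8 0x00FF00FF00FF00FF
    (pvSt 4 0x0F0F0F0F0F0F0F0F (pvSt 2 0x3333333333333333 x))))
def pvW64 (x : Nat) : Nat := pvStRest (pvSt 1 0x5555555555555555 x)

-- population count (proof-internal; via PySem's bit-count primitive)
def pvPc (n : Nat) : Nat := PySem.Int.bitCount (Int.ofNat n)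

theorem pvPcRec (n : Nat) : pvPc n = n % 2 + pvPc (n / 2) := by
  rcases Nat.eq_zero_or_pos n with h | h
  · subst h; simp [pvPc]
  · simpa [pvPc] using PySem.Int.bitCount_natCast h

theorem pvPcSplit (w : Nat) : ∀ lo hi : Nat, lo < 2 ^ w → pvPc (lo + 2 ^ w * hi) = pvPc lo + pvPc hi := by
  induction w with
  | zero =>
    intro lo hi h
    have : lo = 0 := by omega
    subst this
    simp [pvPc]
  | succ w ih =>
    intro lo hi h
    rw [pvPcRec (lo + 2 ^ (w + 1) * hi), pvPcRec lo]
    have hp : 2 ^ (w + 1) = 2 * 2 ^ w := by ring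
    have hp2 : 2 ^ (w + 1) * hi = 2 * (2 ^ w * hi) := by rw [hp]; ring
    have e1 : (lo + 2 ^ (w + 1) * hi) % 2 = lo % 2 := by rw [hp2]; omega
    have e2 : (lo + 2 ^ (w + 1) * hi) / 2 = lo / 2 + 2 ^ w * hi := by rw [hp2]; omega
    rw [e1, e2, ih (lo / 2) hi (by omega)]
    omega

theorem pvPcSplitN {w X : Nat} (hX : X = 2 ^ w) (lo hi : Nat) (h : lo < X) :
    pvPc (lo + X * hi) = pvPc lo + pvPc hi := by
  subst hX; exact pvPcSplit w lo hi h

theorem pvTestBitSplit {w lo : Nat} (hi i : Nat) (h : lo < 2 ^ w) :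
    (lo + 2 ^ w * hi).testBit i = if i < w then lo.testBit i else hi.testBit (i - w) := by
  rcases Nat.lt_or_ge i w with hc | hc
  · rw [if_pos hc, Nat.testBit_eq_decide_div_mod_eq, Nat.testBit_eq_decide_div_mod_eq]
    have e : 2 ^ w = 2 ^ i * 2 ^ (w - i) := by rw [← pow_add]; congr 1; omega
    have e2 : (lo + 2 ^ w * hi) / 2 ^ i = lo / 2 ^ i + 2 ^ (w - i) * hi := by
      rw [e, mul_assoc, Nat.add_mul_div_left _ _ (Nat.two_pow_pos i)]
    have e3 : 2 ^ (w - i) = 2 * 2 ^ (w - i - 1) := by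
      rw [← pow_succ']; congr 1; omega
    have e3' : 2 ^ (w - i) * hi = 2 * (2 ^ (w - i - 1) * hi) := by rw [e3]; ring
    have e4 : (lo / 2 ^ i + 2 ^ (w - i) * hi) % 2 = lo / 2 ^ i % 2 := by rw [e3']; omega
    rw [e2, e4]
  · rw [if_neg (by omega), Nat.testBit_eq_decide_div_mod_eq, Nat.testBit_eq_decide_div_mod_eq]
    have e1 : 2 ^ i = 2 ^ w * 2 ^ (i - w) := by rw [← pow_add]; congr 1; omega
    have e : (lo + 2 ^ w * hi) / 2 ^ i = hi / 2 ^ (i - w) := by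
      rw [e1, ← Nat.div_div_eq_div_mul, Nat.add_mul_div_left _ _ (Nat.two_pow_pos w),
        Nat.div_eq_of_lt h, Nat.zero_add]
    rw [e]

theorem pvLandSplit {w lo hi a b : Nat} (hlo : lo < 2 ^ w) (ha : a < 2 ^ w) :
    (lo + 2 ^ w * hi) &&& (a + 2 ^ w * b) = (lo &&& a) + 2 ^ w * (hi &&& b) := by
  have hla : lo &&& a < 2 ^ w := lt_of_le_of_lt Nat.and_le_right ha
  apply Nat.eq_of_testBit_eq
  intro i
  rw [Nat.testBit_land, pvTestBitSplit hi i hlo, pvTestBitSplit b i ha,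
    pvTestBitSplit (hi &&& b) i hla]
  by_cases h : i < w <;> simp [h]

theorem pvLandMod {w m : Nat} (a : Nat) (hm : m < 2 ^ w) : a &&& m = (a % 2 ^ w) &&& m := by
  apply Nat.eq_of_testBit_eq
  intro i
  rw [Nat.testBit_land, Nat.testBit_land, Nat.testBit_mod_two_pow]
  by_cases h : i < w
  · simp [h]
  · have hf : m.testBit i = false :=
      Nat.testBit_lt_two_pow (lt_of_lt_of_le hm (Nat.pow_le_pow_right (by norm_num) (by omega)))
    simp [h, hf]

theorem pvLandOnes {w a : Nat} (h : a < 2 ^ w) : a &&& (2 ^ w - 1) = a := by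
  apply Nat.eq_of_testBit_eq
  intro i
  rw [Nat.testBit_land, Nat.testBit_two_pow_sub_one]
  by_cases hc : i < w
  · simp [hc]
  · have hf : a.testBit i = false :=
      Nat.testBit_lt_two_pow (lt_of_lt_of_le h (Nat.pow_le_pow_right (by norm_num) (by omega)))
    simp [hc, hf]

theorem pvStLe (s m x : Nat) : pvSt s m x ≤ 2 * m := by
  unfold pvSt
  have h1 : x &&& m ≤ m := Nat.and_le_right
  have h2 : (x >>> s) &&& m ≤ m := Nat.and_le_right
  omega

theorem pvDist {W s m lo hi : Nat} (hs : s ≤ W) (hm : m < 2 ^ (W - s)) (hlo : lo < 2 ^ W)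
    (_hhi : hi < 2 ^ W) :
    pvSt s (m + 2 ^ W * m) (lo + 2 ^ W * hi) = pvSt s m lo + 2 ^ W * pvSt s m hi := by
  have hmW : m < 2 ^ W := lt_of_lt_of_le hm (Nat.pow_le_pow_right (by norm_num) (by omega))
  have hsplit : 2 ^ W = 2 ^ s * 2 ^ (W - s) := by rw [← pow_add]; congr 1; omega
  have h1 : (lo + 2 ^ W * hi) &&& (m + 2 ^ W * m) = (lo &&& m) + 2 ^ W * (hi &&& m) :=
    pvLandSplit hlo hmW
  have hA : lo >>> s < 2 ^ (W - s) := by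
    rw [Nat.shiftRight_eq_div_pow]
    apply Nat.div_lt_of_lt_mul
    rw [← hsplit]; exact hlo
  have h2 : (lo + 2 ^ W * hi) >>> s = (lo >>> s + 2 ^ (W - s) * (hi % 2 ^ s)) + 2 ^ W * (hi >>> s) := by
    rw [Nat.shiftRight_eq_div_pow, Nat.shiftRight_eq_div_pow, Nat.shiftRight_eq_div_pow]
    have e : 2 ^ W * hi = 2 ^ s * (2 ^ (W - s) * hi) := by rw [hsplit]; ring
    rw [e, Nat.add_mul_div_left _ _ (Nat.two_pow_pos s)]
    have hhiq : hi % 2 ^ s + 2 ^ s * (hi / 2 ^ s) = hi := Nat.mod_add_div hi (2 ^ s)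
    have e2 : 2 ^ (W - s) * (hi % 2 ^ s) + 2 ^ W * (hi / 2 ^ s) = 2 ^ (W - s) * hi := by
      conv_rhs => rw [← hhiq]
      rw [hsplit]; ring
    omega
  have hAlt : lo >>> s + 2 ^ (W - s) * (hi % 2 ^ s) < 2 ^ W := by
    have h5 : hi % 2 ^ s < 2 ^ s := Nat.mod_lt _ (Nat.two_pow_pos s)
    have h6 : 2 ^ (W - s) * (hi % 2 ^ s) ≤ 2 ^ (W - s) * (2 ^ s - 1) :=
      Nat.mul_le_mul_left _ (by omega)
    have h7 : 2 ^ (W - s) * (2 ^ s - 1) = 2 ^ W - 2 ^ (W - s) := by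
      rw [Nat.mul_sub, mul_one, mul_comm (2 ^ (W - s)) (2 ^ s), ← hsplit]
    have h8 : 0 < 2 ^ (W - s) := Nat.two_pow_pos _
    have h9 : 2 ^ (W - s) ≤ 2 ^ W := Nat.pow_le_pow_right (by norm_num) (by omega)
    omega
  have h3 : ((lo >>> s + 2 ^ (W - s) * (hi % 2 ^ s)) + 2 ^ W * (hi >>> s)) &&& (m + 2 ^ W * m) =
      ((lo >>> s + 2 ^ (W - s) * (hi % 2 ^ s)) &&& m) + 2 ^ W * ((hi >>> s) &&& m) :=
    pvLandSplit hAlt hmW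
  have h4 : (lo >>> s + 2 ^ (W - s) * (hi % 2 ^ s)) &&& m = (lo >>> s) &&& m := by
    rw [pvLandMod _ hm, pvLandMod (lo >>> s) hm, Nat.add_mul_mod_self_left]
  unfold pvSt
  rw [h1, h2, h3, h4]
  ring

theorem pvDistN {W s m m2 X lo hi : Nat} (hX : X = 2 ^ W) (hm2 : m2 = m + X * m) (hs : s ≤ W)
    (hm : m < 2 ^ (W - s)) (hlo : lo < X) (hhi : hi < X) :
    pvSt s m2 (lo + X * hi) = pvSt s m lo + X * pvSt s m hi := by
  subst hX; subst hm2
  exact pvDist hs hm hlo hhi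

theorem pvLast {W a b : Nat} (ha : a < 2 ^ W) (hb : b < 2 ^ W) :
    pvSt W (2 ^ W - 1) (a + 2 ^ W * b) = a + b := by
  unfold pvSt
  have hones : (2 : Nat) ^ W - 1 < 2 ^ W := by have := Nat.two_pow_pos W; omega
  have h1 : (a + 2 ^ W * b) &&& (2 ^ W - 1) = a := by
    rw [pvLandMod _ hones, Nat.add_mul_mod_self_left, Nat.mod_eq_of_lt ha, pvLandOnes ha]
  have h2 : (a + 2 ^ W * b) >>> W = b := by
    rw [Nat.shiftRight_eq_div_pow, Nat.add_mul_div_left _ _ (Nat.two_pow_pos W),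
      Nat.div_eq_of_lt ha, Nat.zero_add]
  rw [h1, h2, pvLandOnes hb]

theorem pvLastN {W X m a b : Nat} (hX : X = 2 ^ W) (hm : m = X - 1) (ha : a < X) (hb : b < X) :
    pvSt W m (a + X * b) = a + b := by
  subst hX; subst hm
  exact pvLast ha hb

theorem pvC16 {lo hi : Nat} (hlo : lo < 256) (hhi : hi < 256) :
    pvW16 (lo + 256 * hi) = pvW8 lo + pvW8 hi := by
  have d1 := pvDistN (W := 8) (s := 1) (m := 0x55) (m2 := 0x5555) (X := 256) (lo := lo) (hi := hi)
    (by norm_num) (by norm_num) (by norm_num) (by norm_num) hlo hhi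
  have b1l := pvStLe 1 0x55 lo
  have b1r := pvStLe 1 0x55 hi
  have d2 := pvDistN (W := 8) (s := 2) (m := 0x33) (m2 := 0x3333) (X := 256)
    (lo := pvSt 1 0x55 lo) (hi := pvSt 1 0x55 hi)
    (by norm_num) (by norm_num) (by norm_num) (by norm_num) (by omega) (by omega)
  have b2l := pvStLe 2 0x33 (pvSt 1 0x55 lo)
  have b2r := pvStLe 2 0x33 (pvSt 1 0x55 hi)
  have d3 := pvDistN (W := 8) (s := 4) (m := 0x0F) (m2 := 0x0F0F) (X := 256)
    (lo := pvSt 2 0x33 (pvSt 1 0x55 lo)) (hi := pvSt 2 0x33 (pvSt 1 0x55 hi))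
    (by norm_num) (by norm_num) (by norm_num) (by norm_num) (by omega) (by omega)
  have b3l := pvStLe 4 0x0F (pvSt 2 0x33 (pvSt 1 0x55 lo))
  have b3r := pvStLe 4 0x0F (pvSt 2 0x33 (pvSt 1 0x55 hi))
  have l4 := pvLastN (W := 8) (X := 256) (m := 0xFF)
    (a := pvSt 4 0x0F (pvSt 2 0x33 (pvSt 1 0x55 lo)))
    (b := pvSt 4 0x0F (pvSt 2 0x33 (pvSt 1 0x55 hi)))
    (by norm_num) (by norm_num) (by omega) (by omega)
  unfold pvW16 pvW8
  rw [d1, d2, d3, l4]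

theorem pvC32 {lo hi : Nat} (hlo : lo < 65536) (hhi : hi < 65536) :
    pvW32 (lo + 65536 * hi) = pvW16 lo + pvW16 hi := by
  have d1 := pvDistN (W := 16) (s := 1) (m := 0x5555) (m2 := 0x55555555) (X := 65536)
    (lo := lo) (hi := hi) (by norm_num) (by norm_num) (by norm_num) (by norm_num) hlo hhi
  have b1l := pvStLe 1 0x5555 lo
  have b1r := pvStLe 1 0x5555 hi
  have d2 := pvDistN (W := 16) (s := 2) (m := 0x3333) (m2 := 0x33333333) (X := 65536)
    (lo := pvSt 1 0x5555 lo) (hi := pvSt 1 0x5555 hi)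
    (by norm_num) (by norm_num) (by norm_num) (by norm_num) (by omega) (by omega)
  have b2l := pvStLe 2 0x3333 (pvSt 1 0x5555 lo)
  have b2r := pvStLe 2 0x3333 (pvSt 1 0x5555 hi)
  have d3 := pvDistN (W := 16) (s := 4) (m := 0x0F0F) (m2 := 0x0F0F0F0F) (X := 65536)
    (lo := pvSt 2 0x3333 (pvSt 1 0x5555 lo)) (hi := pvSt 2 0x3333 (pvSt 1 0x5555 hi))
    (by norm_num) (by norm_num) (by norm_num) (by norm_num) (by omega) (by omega)
  have b3l := pvStLe 4 0x0F0F (pvSt 2 0x3333 (pvSt 1 0x5555 lo))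
  have b3r := pvStLe 4 0x0F0F (pvSt 2 0x3333 (pvSt 1 0x5555 hi))
  have d4 := pvDistN (W := 16) (s := 8) (m := 0x00FF) (m2 := 0x00FF00FF) (X := 65536)
    (lo := pvSt 4 0x0F0F (pvSt 2 0x3333 (pvSt 1 0x5555 lo)))
    (hi := pvSt 4 0x0F0F (pvSt 2 0x3333 (pvSt 1 0x5555 hi)))
    (by norm_num) (by norm_num) (by norm_num) (by norm_num) (by omega) (by omega)
  have b4l := pvStLe 8 0x00FF (pvSt 4 0x0F0F (pvSt 2 0x3333 (pvSt 1 0x5555 lo)))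
  have b4r := pvStLe 8 0x00FF (pvSt 4 0x0F0F (pvSt 2 0x3333 (pvSt 1 0x5555 hi)))
  have l5 := pvLastN (W := 16) (X := 65536) (m := 0xFFFF)
    (a := pvSt 8 0x00FF (pvSt 4 0x0F0F (pvSt 2 0x3333 (pvSt 1 0x5555 lo))))
    (b := pvSt 8 0x00FF (pvSt 4 0x0F0F (pvSt 2 0x3333 (pvSt 1 0x5555 hi))))
    (by norm_num) (by norm_num) (by omega) (by omega)
  unfold pvW32 pvW16
  rw [d1, d2, d3, d4, l5]

theorem pvC64 {lo hi : Nat} (hlo : lo < 4294967296) (hhi : hi < 4294967296) :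
    pvW64 (lo + 4294967296 * hi) = pvW32 lo + pvW32 hi := by
  have d1 := pvDistN (W := 32) (s := 1) (m := 0x55555555) (m2 := 0x5555555555555555)
    (X := 4294967296) (lo := lo) (hi := hi)
    (by norm_num) (by norm_num) (by norm_num) (by norm_num) hlo hhi
  have b1l := pvStLe 1 0x55555555 lo
  have b1r := pvStLe 1 0x55555555 hi
  have d2 := pvDistN (W := 32) (s := 2) (m := 0x33333333) (m2 := 0x3333333333333333)
    (X := 4294967296) (lo := pvSt 1 0x55555555 lo) (hi := pvSt 1 0x55555555 hi)
    (by norm_num) (by norm_num) (by norm_num) (by norm_num) (by omega) (by omega)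
  have b2l := pvStLe 2 0x33333333 (pvSt 1 0x55555555 lo)
  have b2r := pvStLe 2 0x33333333 (pvSt 1 0x55555555 hi)
  have d3 := pvDistN (W := 32) (s := 4) (m := 0x0F0F0F0F) (m2 := 0x0F0F0F0F0F0F0F0F)
    (X := 4294967296) (lo := pvSt 2 0x33333333 (pvSt 1 0x55555555 lo))
    (hi := pvSt 2 0x33333333 (pvSt 1 0x55555555 hi))
    (by norm_num) (by norm_num) (by norm_num) (by norm_num) (by omega) (by omega)
  have b3l := pvStLe 4 0x0F0F0F0F (pvSt 2 0x33333333 (pvSt 1 0x55555555 lo))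
  have b3r := pvStLe 4 0x0F0F0F0F (pvSt 2 0x33333333 (pvSt 1 0x55555555 hi))
  have d4 := pvDistN (W := 32) (s := 8) (m := 0x00FF00FF) (m2 := 0x00FF00FF00FF00FF)
    (X := 4294967296)
    (lo := pvSt 4 0x0F0F0F0F (pvSt 2 0x33333333 (pvSt 1 0x55555555 lo)))
    (hi := pvSt 4 0x0F0F0F0F (pvSt 2 0x33333333 (pvSt 1 0x55555555 hi)))
    (by norm_num) (by norm_num) (by norm_num) (by norm_num) (by omega) (by omega)
  have b4l := pvStLe 8 0x00FF00FF (pvSt 4 0x0F0F0F0F (pvSt 2 0x33333333 (pvSt 1 0x55555555 lo)))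
  have b4r := pvStLe 8 0x00FF00FF (pvSt 4 0x0F0F0F0F (pvSt 2 0x33333333 (pvSt 1 0x55555555 hi)))
  have d5 := pvDistN (W := 32) (s := 16) (m := 0x0000FFFF) (m2 := 0x0000FFFF0000FFFF)
    (X := 4294967296)
    (lo := pvSt 8 0x00FF00FF (pvSt 4 0x0F0F0F0F (pvSt 2 0x33333333 (pvSt 1 0x55555555 lo))))
    (hi := pvSt 8 0x00FF00FF (pvSt 4 0x0F0F0F0F (pvSt 2 0x33333333 (pvSt 1 0x55555555 hi))))
    (by norm_num) (by norm_num) (by norm_num) (by norm_num) (by omega) (by omega)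
  have b5l := pvStLe 16 0x0000FFFF
    (pvSt 8 0x00FF00FF (pvSt 4 0x0F0F0F0F (pvSt 2 0x33333333 (pvSt 1 0x55555555 lo))))
  have b5r := pvStLe 16 0x0000FFFF
    (pvSt 8 0x00FF00FF (pvSt 4 0x0F0F0F0F (pvSt 2 0x33333333 (pvSt 1 0x55555555 hi))))
  have l6 := pvLastN (W := 32) (X := 4294967296) (m := 0xFFFFFFFF)
    (a := pvSt 16 0x0000FFFF
      (pvSt 8 0x00FF00FF (pvSt 4 0x0F0F0F0F (pvSt 2 0x33333333 (pvSt 1 0x55555555 lo)))))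
    (b := pvSt 16 0x0000FFFF
      (pvSt 8 0x00FF00FF (pvSt 4 0x0F0F0F0F (pvSt 2 0x33333333 (pvSt 1 0x55555555 hi)))))
    (by norm_num) (by norm_num) (by omega) (by omega)
  unfold pvW64 pvStRest pvW32
  rw [d1, d2, d3, d4, d5, l6]

set_option maxRecDepth 8192 in
theorem pvK8 : ∀ n : Nat, n < 256 → pvW8 n = pvPc n := by decide

theorem pvK16 : ∀ n : Nat, n < 65536 → pvW16 n = pvPc n := by
  intro n h
  have hdec : n % 256 + 256 * (n / 256) = n := by omega
  calc pvW16 n = pvW16 (n % 256 + 256 * (n / 256)) := by rw [hdec]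
    _ = pvW8 (n % 256) + pvW8 (n / 256) := pvC16 (by omega) (by omega)
    _ = pvPc (n % 256) + pvPc (n / 256) := by rw [pvK8 _ (by omega), pvK8 _ (by omega)]
    _ = pvPc (n % 256 + 256 * (n / 256)) :=
        (pvPcSplitN (w := 8) (by norm_num) _ _ (by omega)).symm
    _ = pvPc n := by rw [hdec]

theorem pvK32 : ∀ n : Nat, n < 4294967296 → pvW32 n = pvPc n := by
  intro n h
  have hdec : n % 65536 + 65536 * (n / 65536) = n := by omega
  calc pvW32 n = pvW32 (n % 65536 + 65536 * (n / 65536)) := by rw [hdec]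
    _ = pvW16 (n % 65536) + pvW16 (n / 65536) := pvC32 (by omega) (by omega)
    _ = pvPc (n % 65536) + pvPc (n / 65536) := by rw [pvK16 _ (by omega), pvK16 _ (by omega)]
    _ = pvPc (n % 65536 + 65536 * (n / 65536)) :=
        (pvPcSplitN (w := 16) (by norm_num) _ _ (by omega)).symm
    _ = pvPc n := by rw [hdec]

theorem pvK64 : ∀ n : Nat, n < 18446744073709551616 → pvW64 n = pvPc n := by
  intro n h
  have hdec : n % 4294967296 + 4294967296 * (n / 4294967296) = n := by omega
  calc pvW64 n = pvW64 (n % 4294967296 + 4294967296 * (n / 4294967296)) := by rw [hdec]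
    _ = pvW32 (n % 4294967296) + pvW32 (n / 4294967296) := pvC64 (by omega) (by omega)
    _ = pvPc (n % 4294967296) + pvPc (n / 4294967296) := by
        rw [pvK32 _ (by omega), pvK32 _ (by omega)]
    _ = pvPc (n % 4294967296 + 4294967296 * (n / 4294967296)) :=
        (pvPcSplitN (w := 32) (by norm_num) _ _ (by omega)).symm
    _ = pvPc n := by rw [hdec]

-- Int-level facts: PySem.Int.band / bor / >>> on the two constructors.
theorem pvLandAddLdiff (n m : Nat) : (n &&& m) + Nat.ldiff n m = n := by
  induction n using Nat.binaryRec generalizing m with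
  | zero =>
    have h1 : 0 &&& m = 0 := by simp
    have h2 : Nat.ldiff 0 m = 0 := Nat.eq_of_testBit_eq (by simp [Nat.testBit_ldiff])
    rw [h1, h2]
  | bit a n ih =>
    induction m using Nat.binaryRec with
    | zero =>
      have h1 : Nat.bit a n &&& 0 = 0 := by simp
      have h2 : Nat.ldiff (Nat.bit a n) 0 = Nat.bit a n :=
        Nat.eq_of_testBit_eq (by simp [Nat.testBit_ldiff])
      rw [h1, h2, Nat.zero_add]
    | bit b m _ =>
      rw [Nat.land_bit, Nat.ldiff_bit]
      have h := ih m
      cases a <;> cases b <;> simp [Nat.bit] <;> omega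

theorem pvBandOfNat (a m : Nat) :
    PySem.Int.band (Int.ofNat a) (Int.ofNat m) = Int.ofNat (a &&& m) := by
  simp [PySem.Int.band]

theorem pvBandNegSucc (a m : Nat) :
    PySem.Int.band (Int.negSucc a) (Int.ofNat m) = Int.ofNat (Nat.ldiff m a) := by
  have hns : ¬ (0 : Int) ≤ Int.negSucc a := by
    rw [Int.not_le]
    exact Int.negSucc_lt_zero a
  have hpos : (0 : Int) ≤ Int.ofNat m := Int.natCast_nonneg m
  have hneg : -Int.negSucc a - 1 = Int.ofNat a := by
    rw [Int.neg_negSucc]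
    push_cast
    rw [Int.add_sub_cancel]
    exact rfl
  unfold PySem.Int.band
  rw [if_neg hns, if_pos hpos, hneg]
  have e : m - (m &&& a) = Nat.ldiff m a := by
    have h := pvLandAddLdiff m a
    omega
  show (↑(m - (m &&& a)) : Int) = Int.ofNat (Nat.ldiff m a)
  rw [e]
  exact rfl

theorem pvNegSubOne (n : Nat) : -(n : Int) - 1 = Int.negSucc n := by
  rw [Int.negSucc_eq]
  push_cast
  ring

theorem pvBorOO (a b : Nat) :
    PySem.Int.bor (Int.ofNat a) (Int.ofNat b) = Int.ofNat (a ||| b) := by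
  simp [PySem.Int.bor]

theorem pvBorON (a b : Nat) :
    PySem.Int.bor (Int.ofNat a) (Int.negSucc b) = Int.negSucc (Nat.ldiff b a) := by
  have hns : ¬ (0 : Int) ≤ Int.negSucc b := by
    rw [Int.not_le]; exact Int.negSucc_lt_zero b
  have hpos : (0 : Int) ≤ Int.ofNat a := Int.natCast_nonneg a
  have hneg : -Int.negSucc b - 1 = Int.ofNat b := by
    rw [Int.neg_negSucc]; push_cast; rw [Int.add_sub_cancel]; exact rfl
  unfold PySem.Int.bor
  rw [if_pos hpos, if_neg hns, hneg]
  have e : b - (b &&& a) = Nat.ldiff b a := by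
    have h := pvLandAddLdiff b a
    omega
  show -(↑((Int.ofNat b).toNat - ((Int.ofNat b).toNat &&& (Int.ofNat a).toNat)) : Int) - 1 = _
  have ht : (Int.ofNat b).toNat = b := rfl
  have ha : (Int.ofNat a).toNat = a := rfl
  rw [ht, ha, e, pvNegSubOne]

theorem pvBorNO (a b : Nat) :
    PySem.Int.bor (Int.negSucc a) (Int.ofNat b) = Int.negSucc (Nat.ldiff a b) := by
  have hns : ¬ (0 : Int) ≤ Int.negSucc a := by
    rw [Int.not_le]; exact Int.negSucc_lt_zero a
  have hpos : (0 : Int) ≤ Int.ofNat b := Int.natCast_nonneg b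
  have hneg : -Int.negSucc a - 1 = Int.ofNat a := by
    rw [Int.neg_negSucc]; push_cast; rw [Int.add_sub_cancel]; exact rfl
  unfold PySem.Int.bor
  rw [if_neg hns, if_pos hpos, hneg]
  have e : a - (a &&& b) = Nat.ldiff a b := by
    have h := pvLandAddLdiff a b
    omega
  show -(↑((Int.ofNat a).toNat - ((Int.ofNat a).toNat &&& (Int.ofNat b).toNat)) : Int) - 1 = _
  have ht : (Int.ofNat a).toNat = a := rfl
  have hb : (Int.ofNat b).toNat = b := rfl
  rw [ht, hb, e, pvNegSubOne]

theorem pvBorNN (a b : Nat) :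
    PySem.Int.bor (Int.negSucc a) (Int.negSucc b) = Int.negSucc (a &&& b) := by
  have hnsa : ¬ (0 : Int) ≤ Int.negSucc a := by
    rw [Int.not_le]; exact Int.negSucc_lt_zero a
  have hnsb : ¬ (0 : Int) ≤ Int.negSucc b := by
    rw [Int.not_le]; exact Int.negSucc_lt_zero b
  have hnega : -Int.negSucc a - 1 = Int.ofNat a := by
    rw [Int.neg_negSucc]; push_cast; rw [Int.add_sub_cancel]; exact rfl
  have hnegb : -Int.negSucc b - 1 = Int.ofNat b := by
    rw [Int.neg_negSucc]; push_cast; rw [Int.add_sub_cancel]; exact rfl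
  unfold PySem.Int.bor
  rw [if_neg hnsa, if_neg hnsb, hnega, hnegb]
  show -(↑((Int.ofNat a).toNat &&& (Int.ofNat b).toNat) : Int) - 1 = _
  have ht : (Int.ofNat a).toNat = a := rfl
  have hb : (Int.ofNat b).toNat = b := rfl
  rw [ht, hb, pvNegSubOne]

theorem pvShrOfNat (a s : Nat) : Int.ofNat a >>> s = Int.ofNat (a >>> s) := rfl
theorem pvShrNegSucc (a s : Nat) : Int.negSucc a >>> s = Int.negSucc (a >>> s) := rfl

-- numeral-level bit facts for the 64-bit truncation of the first SWAR step
theorem pvM1High : ∀ i : Nat, 63 ≤ i → Nat.testBit 0x5555555555555555 i = false := by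
  intro i h
  exact Nat.testBit_lt_two_pow
    (lt_of_lt_of_le (by norm_num) (Nat.pow_le_pow_right (by norm_num) h))

theorem pvMAll : ∀ i : Nat, i < 64 → Nat.testBit 0xFFFFFFFFFFFFFFFF i = true := by
  intro i h
  rw [show (0xFFFFFFFFFFFFFFFF : Nat) = 2 ^ 64 - 1 by norm_num, Nat.testBit_two_pow_sub_one]
  simpa using h

theorem pvN1 (a : Nat) :
    a &&& 0x5555555555555555 = (a &&& 0xFFFFFFFFFFFFFFFF) &&& 0x5555555555555555 := by
  apply Nat.eq_of_testBit_eq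
  intro i
  rw [Nat.testBit_land, Nat.testBit_land, Nat.testBit_land]
  by_cases h : i < 63
  · rw [pvMAll i (by omega)]
    simp
  · rw [pvM1High i (by omega)]
    simp

theorem pvN2 (a : Nat) :
    (a >>> 1) &&& 0x5555555555555555 =
      ((a &&& 0xFFFFFFFFFFFFFFFF) >>> 1) &&& 0x5555555555555555 := by
  apply Nat.eq_of_testBit_eq
  intro i
  rw [Nat.testBit_land, Nat.testBit_land, Nat.testBit_shiftRight, Nat.testBit_shiftRight,
    Nat.testBit_land]
  by_cases h : i < 63
  · rw [pvMAll (1 + i) (by omega)]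
    simp
  · rw [pvM1High i (by omega)]
    simp

theorem pvN3 (a : Nat) :
    Nat.ldiff 0x5555555555555555 a =
      (Nat.ldiff 0xFFFFFFFFFFFFFFFF a) &&& 0x5555555555555555 := by
  apply Nat.eq_of_testBit_eq
  intro i
  rw [Nat.testBit_ldiff, Nat.testBit_land, Nat.testBit_ldiff]
  by_cases h : i < 63
  · rw [pvMAll i (by omega)]
    simp [Bool.and_comm]
  · rw [pvM1High i (by omega)]
    simp

theorem pvN4 (a : Nat) :
    Nat.ldiff 0x5555555555555555 (a >>> 1) =
      ((Nat.ldiff 0xFFFFFFFFFFFFFFFF a) >>> 1) &&& 0x5555555555555555 := by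
  apply Nat.eq_of_testBit_eq
  intro i
  rw [Nat.testBit_ldiff, Nat.testBit_shiftRight, Nat.testBit_land, Nat.testBit_shiftRight,
    Nat.testBit_ldiff]
  by_cases h : i < 63
  · rw [pvMAll (1 + i) (by omega)]
    simp [Bool.and_comm]
  · rw [pvM1High i (by omega)]
    simp

theorem pvLit (n : Nat) : (OfNat.ofNat n : Int) = Int.ofNat (OfNat.ofNat n) := rfl
theorem pvAddOfNat (a b : Nat) : Int.ofNat a + Int.ofNat b = Int.ofNat (a + b) := rfl

-- the low 64 two's-complement bits of an Int, as a Nat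
def pvTlow : Int → Nat
  | .ofNat a => a &&& 0xFFFFFFFFFFFFFFFF
  | .negSucc a => Nat.ldiff 0xFFFFFFFFFFFFFFFF a

theorem pvTlowLt (x : Int) : pvTlow x < 18446744073709551616 := by
  cases x with
  | ofNat a =>
    have h := Nat.and_le_right (n := a) (m := 0xFFFFFFFFFFFFFFFF)
    simpa [pvTlow] using by omega
  | negSucc a =>
    have h := pvLandAddLdiff 0xFFFFFFFFFFFFFFFF a
    simpa [pvTlow] using by omega

-- A's SWAR pipeline computes exactly pvW64 of the low 64 bits
theorem pvPopA (x : Int) : pvPopcountA x = Int.ofNat (pvW64 (pvTlow x)) := by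
  cases x with
  | ofNat a =>
    have e : pvPopcountA (Int.ofNat a) = Int.ofNat (pvW64 a) := by
      simp only [pvPopcountA, pvW64, pvStRest, pvSt, pvLit, pvBandOfNat, pvShrOfNat, pvAddOfNat]
    rw [e]
    show Int.ofNat (pvW64 a) = Int.ofNat (pvW64 (a &&& 0xFFFFFFFFFFFFFFFF))
    unfold pvW64
    congr 1
    unfold pvSt
    rw [pvN1 a, pvN2 a]
  | negSucc a =>
    have e : pvPopcountA (Int.negSucc a) =
        Int.ofNat (pvStRest (Nat.ldiff 0x5555555555555555 a +
          Nat.ldiff 0x5555555555555555 (a >>> 1))) := by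
      simp only [pvPopcountA, pvStRest, pvSt, pvLit, pvBandOfNat, pvBandNegSucc, pvShrOfNat,
        pvShrNegSucc, pvAddOfNat]
    rw [e]
    show _ = Int.ofNat (pvW64 (Nat.ldiff 0xFFFFFFFFFFFFFFFF a))
    unfold pvW64
    congr 1
    unfold pvSt
    rw [pvN3 a, pvN4 a]

-- Python's bit i of an Int (two's complement), as a Bool
def pvPBit (x : Int) (i : Nat) : Bool :=
  match x with
  | .ofNat a => a.testBit i
  | .negSucc a => !a.testBit i

-- the test B performs, ((h >> bit) & 1) == 1, computes the two's-complement bit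
theorem pvCastEq (n : Nat) : Int.ofNat n = (n : Int) := rfl

theorem pvBitI (x : Int) (k : Nat) :
    (PySem.Int.band (x >>> ((k : Nat) : Int)) 1 == 1) = pvPBit x k := by
  cases x with
  | ofNat a =>
    rw [pvCastEq a, Int.shiftRight_natCast, ← pvCastEq (a >>> k), pvLit 1,
      pvBandOfNat]
    have hm : (a >>> k) &&& 1 = a / 2 ^ k % 2 := by
      rw [Nat.and_one_is_mod, Nat.shiftRight_eq_div_pow]
    rw [hm]
    show (Int.ofNat (a / 2 ^ k % 2) == Int.ofNat 1) = a.testBit k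
    rw [Nat.testBit_eq_decide_div_mod_eq]
    by_cases h : a / 2 ^ k % 2 = 1
    · rw [h]; simp
    · have h0 : a / 2 ^ k % 2 = 0 := by omega
      rw [h0]; simp [h]
  | negSucc a =>
    rw [Int.shiftRight_negSucc, pvLit 1, pvBandNegSucc]
    have hl : Nat.ldiff 1 (a >>> k) = 1 - ((a >>> k) &&& 1) := by
      have h := pvLandAddLdiff 1 (a >>> k)
      rw [Nat.land_comm] at h
      omega
    have hm : (a >>> k) &&& 1 = a / 2 ^ k % 2 := by
      rw [Nat.and_one_is_mod, Nat.shiftRight_eq_div_pow]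
    rw [hl, hm]
    show (Int.ofNat (1 - a / 2 ^ k % 2) == Int.ofNat 1) = !a.testBit k
    rw [Nat.testBit_eq_decide_div_mod_eq]
    by_cases h : a / 2 ^ k % 2 = 1
    · rw [h]; simp
    · have h0 : a / 2 ^ k % 2 = 0 := by omega
      rw [h0]; simp [h]

-- bit i of a Python OR is the OR of the bits
theorem pvPBitBor (x y : Int) (i : Nat) :
    pvPBit (PySem.Int.bor x y) i = (pvPBit x i || pvPBit y i) := by
  cases x with
  | ofNat a =>
    cases y with
    | ofNat b =>
      rw [pvBorOO]
      simp [pvPBit, Nat.testBit_lor]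
    | negSucc b =>
      rw [pvBorON]
      simp only [pvPBit, Nat.testBit_ldiff]
      cases a.testBit i <;> cases b.testBit i <;> rfl
  | negSucc a =>
    cases y with
    | ofNat b =>
      rw [pvBorNO]
      simp only [pvPBit, Nat.testBit_ldiff]
      cases a.testBit i <;> cases b.testBit i <;> rfl
    | negSucc b =>
      rw [pvBorNN]
      simp only [pvPBit, Nat.testBit_land]
      cases a.testBit i <;> cases b.testBit i <;> rfl

-- bit i of the OR-fold = any element has bit i
theorem pvFoldBor (l : List Int) (acc : Int) (i : Nat) :
    pvPBit (l.foldl (fun m h => PySem.Int.bor m h) acc) i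
      = (pvPBit acc i || l.any (fun h => pvPBit h i)) := by
  induction l generalizing acc with
  | nil => simp
  | cons h t ih =>
    rw [List.foldl_cons, ih, pvPBitBor, List.any_cons, Bool.or_assoc]

-- for i < 64, the low-64 truncation has the same bit
theorem pvTlowBit (x : Int) (i : Nat) (h : i < 64) :
    (pvTlow x).testBit i = pvPBit x i := by
  cases x with
  | ofNat a =>
    show (a &&& 0xFFFFFFFFFFFFFFFF).testBit i = a.testBit i
    rw [Nat.testBit_land, pvMAll i h, Bool.and_true]
  | negSucc a =>
    show (Nat.ldiff 0xFFFFFFFFFFFFFFFF a).testBit i = !a.testBit i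
    rw [Nat.testBit_ldiff, pvMAll i h, Bool.true_and]

-- the counting foldl is countP
theorem pvCountFold {α : Type} (l : List α) (q : α → Bool) (acc : Int) :
    l.foldl (fun a k => if q k then a + 1 else a) acc = acc + (l.countP q : Int) := by
  induction l generalizing acc with
  | nil => simp
  | cons h t ih =>
    rw [List.foldl_cons, List.countP_cons, ih]
    by_cases hq : q h <;> simp [hq] <;> push_cast <;> ring

-- counting set bits below w is the population count, for n < 2^w
theorem pvPcCount : ∀ (w n : Nat), n < 2 ^ w →
    (List.range w).countP (fun i => n.testBit i) = pvPc n := by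
  intro w
  induction w with
  | zero =>
    intro n h
    have : n = 0 := by simpa using h
    subst this
    simp [pvPc]
  | succ w ih =>
    intro n h
    rw [List.range_succ, List.countP_append]
    have hmod : (List.range w).countP (fun i => n.testBit i)
        = (List.range w).countP (fun i => (n % 2 ^ w).testBit i) := by
      apply List.countP_congr
      intro i hi
      rw [List.mem_range] at hi
      rw [Nat.testBit_mod_two_pow]
      simp [hi]
    have hdec : n % 2 ^ w + 2 ^ w * (n / 2 ^ w) = n := Nat.mod_add_div n (2 ^ w)
    have hq : n / 2 ^ w < 2 := by
      have h2 : (2 : Nat) ^ (w + 1) = 2 ^ w * 2 := by ring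
      rw [h2] at h
      exact Nat.div_lt_of_lt_mul (by omega)
    have hq2 : n / 2 ^ w = 0 ∨ n / 2 ^ w = 1 :=
      Nat.le_one_iff_eq_zero_or_eq_one.mp (Nat.lt_succ_iff.mp hq)
    have hsplit : pvPc n = pvPc (n % 2 ^ w) + pvPc (n / 2 ^ w) := by
      conv_lhs => rw [← hdec]
      exact pvPcSplit w _ _ (Nat.mod_lt _ (Nat.two_pow_pos w))
    have htb : n.testBit w = decide (n / 2 ^ w = 1) := by
      rw [Nat.testBit_eq_decide_div_mod_eq, Nat.mod_eq_of_lt hq]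
    have hone : ∀ m : Nat, m < 2 → pvPc m = m := by decide
    rw [hmod, ih _ (Nat.mod_lt _ (Nat.two_pow_pos w)), hsplit, hone _ hq]
    rcases hq2 with h0 | h1
    · rw [h0]
      simp [htb, h0]
    · rw [h1]
      simp [htb, h1]

-- fold of an if-count over a mapped range is a countP over the range
theorem pvFoldMapCount (n : Nat) (P : Int → Bool) :
    ((List.range n).map (fun k : Nat => (k : Int))).foldl
        (fun a bit => if P bit then a + 1 else a) (0 : Int)
      = ((List.range n).countP (fun k : Nat => P ((k : Nat) : Int)) : Int) := by
  rw [List.foldl_map, pvCountFold, zero_add]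

-- ===== VERDICT (by name: the statement is the Claim_ definition above) =====
theorem calculate_pop_count_py_spec : Claim_equal_calculate_pop_count_py := by
  unfold Claim_equal_calculate_pop_count_py
  intro hash_values _
  unfold Spec_calculate_pop_count_py calculate_pop_count_py calculate_pop_count_py_alt
  show pvPopcountA (hash_values.foldl (fun m h => PySem.Int.bor m h) 0)
      = (PySem.List.pyRange 0 64 1).foldl
          (fun acc bit =>
            if hash_values.any (fun h => PySem.Int.band (h >>> bit.toNat) 1 == 1)
            then acc + 1 else acc) 0
  have hrange : PySem.List.pyRange 0 64 1
      = (List.range 64).map (fun k : Nat => (k : Int)) := by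
    rw [PySem.List.pyRange_zero]
    rfl
  rw [hrange,
    pvFoldMapCount 64 (fun bit => hash_values.any (fun h => PySem.Int.band (h >>> ((bit.toNat : Nat) : Int)) 1 == 1))]
  set mask := hash_values.foldl (fun m h => PySem.Int.bor m h) 0 with hmask
  have hcnt : (List.range 64).countP
        (fun k : Nat => hash_values.any (fun h => PySem.Int.band (h >>> ((((k : Int)).toNat : Nat) : Int)) 1 == 1))
      = (List.range 64).countP (fun k => (pvTlow mask).testBit k) := by
    apply List.countP_congr
    intro k hk
    rw [List.mem_range] at hk
    have hfn : (fun h : Int => PySem.Int.band (h >>> ((((k : Int)).toNat : Nat) : Int)) 1 == 1)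
        = fun h : Int => pvPBit h k := by
      funext h
      rw [Int.toNat_natCast, pvBitI]
    rw [hfn]
    have h1 : pvPBit mask k = hash_values.any (fun h => pvPBit h k) := by
      rw [hmask, pvFoldBor]
      have h0 : pvPBit 0 k = false := by
        show Nat.testBit 0 k = false
        exact Nat.zero_testBit k
      rw [h0, Bool.false_or]
    rw [pvTlowBit mask k hk, h1]
  rw [hcnt, pvPcCount 64 (pvTlow mask) (pvTlowLt mask), pvPopA, pvK64 _ (pvTlowLt mask)]
  exact pvCastEq _
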